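-- pv_equiv track=rewrite | github.com/bambatey/build2aiapi | src/services/structural_generator/serializer.py | serialize_tables
-- ===== SOURCE A (Python) =====
-- _PREFERRED_ORDER = [
--     "PROGRAM CONTROL",
--     "MATERIAL PROPERTIES 01 - GENERAL",
--     "MATERIAL PROPERTIES 02 - BASIC MECHANICAL PROPERTIES",
--     "FRAME SECTION PROPERTIES 01 - GENERAL",
--     "AREA SECTION PROPERTIES",
--     "JOINT COORDINATES",
--     "POINT COORDINATES",
--     "CONNECTIVITY - FRAME",
--     "CONNECTIVITY - LINE",
--     "CONNECTIVITY - AREA",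
--     "FRAME SECTION ASSIGNMENTS",
--     "AREA SECTION ASSIGNMENTS",
--     "JOINT RESTRAINT ASSIGNMENTS",
--     "LOAD PATTERN DEFINITIONS",
--     "MASS SOURCE",
--     "JOINT LOADS - FORCE",
--     "FRAME LOADS - DISTRIBUTED",
--     "AREA LOADS - UNIFORM TO FRAME",
--     "AUTO SEISMIC LOADS TO JOINTS",
--     "AUTO WIND LOADS TO JOINTS",
--     "COMBINATION DEFINITIONS",
-- ]
--
-- def _format_value(v: str) -> str:
--     """Boşluk içeren değerleri tırnak içine al."""
--     if " " in v and not (v.startswith('"') and v.endswith('"')):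
--         return f'"{v}"'
--     return v
--
-- def _format_row(row: dict[str, str]) -> str:
--     """Tek bir satır: 3 boşluk girinti + Key=Value boşluk Key=Value..."""
--     return "   " + "   ".join(f"{k}={_format_value(str(v))}" for k, v in row.items())
--
-- def serialize_tables(tables: dict[str, list[dict[str, str]]]) -> str:
--     """Tablolardan .s2k metnini geri üret."""
--     out: list[str] = []
--     out.append("$ Build2AI generated/edited file")
--     out.append("")
--
--     # Önce preferred order'daki tabloları yaz (varsa), sonra geri kalanları
--     seen: set[str] = set()
--     for name in _PREFERRED_ORDER:
--         if name in tables and tables[name]: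
--             _write_table(out, name, tables[name])
--             seen.add(name)
--     for name, rows in tables.items():
--         if name in seen or not rows:
--             continue
--         _write_table(out, name, rows)
--
--     out.append("END TABLE DATA")
--     out.append("")
--     return "\n".join(out)
--
-- def _write_table(out: list[str], name: str, rows: list[dict[str, str]]) -> None:
--     out.append(f'TABLE:  "{name}"')
--     for row in rows:
--         out.append(_format_row(row))
--     out.append("")
-- ===== SOURCE B (Python) =====
-- _PREFERRED_ORDER = [
--     "PROGRAM CONTROL",
--     "MATERIAL PROPERTIES 01 - GENERAL",
--     "MATERIAL PROPERTIES 02 - BASIC MECHANICAL PROPERTIES",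
--     "FRAME SECTION PROPERTIES 01 - GENERAL",
--     "AREA SECTION PROPERTIES",
--     "JOINT COORDINATES",
--     "POINT COORDINATES",
--     "CONNECTIVITY - FRAME",
--     "CONNECTIVITY - LINE",
--     "CONNECTIVITY - AREA",
--     "FRAME SECTION ASSIGNMENTS",
--     "AREA SECTION ASSIGNMENTS",
--     "JOINT RESTRAINT ASSIGNMENTS",
--     "LOAD PATTERN DEFINITIONS",
--     "MASS SOURCE",
--     "JOINT LOADS - FORCE",
--     "FRAME LOADS - DISTRIBUTED",
--     "AREA LOADS - UNIFORM TO FRAME",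
--     "AUTO SEISMIC LOADS TO JOINTS",
--     "AUTO WIND LOADS TO JOINTS",
--     "COMBINATION DEFINITIONS",
-- ]
--
-- def _format_value(v: str) -> str:
--     if " " in v and not (v.startswith('"') and v.endswith('"')):
--         return f'"{v}"'
--     return v
--
-- def serialize_tables(tables: dict[str, list[dict[str, str]]]) -> str:
--     # One pass distributing the non-empty tables into rank buckets
--     # (bucket i = i-th preferred name, last bucket = everything else),
--     # then one pass over the buckets emitting the lines.
--     rank = {name: i for i, name in enumerate(_PREFERRED_ORDER)}
--     buckets = [[] for _ in range(len(_PREFERRED_ORDER) + 1)]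
--     for name, rows in tables.items():
--         if rows:
--             buckets[rank.get(name, len(_PREFERRED_ORDER))].append((name, rows))
--     lines = ["$ Build2AI generated/edited file", ""]
--     for bucket in buckets:
--         for name, rows in bucket:
--             lines.append(f'TABLE:  "{name}"')
--             lines.extend(
--                 "   " + "   ".join(f"{k}={_format_value(str(v))}" for k, v in row.items())
--                 for row in rows
--             )
--             lines.append("")
--     lines.append("END TABLE DATA")
--     lines.append("")
--     return "\n".join(lines)
-- ===== Notes on version B (the rewrite author's own statement) =====
-- stated objective: alternative
-- what changed: Replaces A's preferred-order scan with dict lookups plus a seen-set second pass by a single-pass bucket (counting-sort) partition: a rank dict built once, one pass dropping each non-empty table into its rank bucket, then one emission pass over the buckets.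
import Mathlib
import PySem

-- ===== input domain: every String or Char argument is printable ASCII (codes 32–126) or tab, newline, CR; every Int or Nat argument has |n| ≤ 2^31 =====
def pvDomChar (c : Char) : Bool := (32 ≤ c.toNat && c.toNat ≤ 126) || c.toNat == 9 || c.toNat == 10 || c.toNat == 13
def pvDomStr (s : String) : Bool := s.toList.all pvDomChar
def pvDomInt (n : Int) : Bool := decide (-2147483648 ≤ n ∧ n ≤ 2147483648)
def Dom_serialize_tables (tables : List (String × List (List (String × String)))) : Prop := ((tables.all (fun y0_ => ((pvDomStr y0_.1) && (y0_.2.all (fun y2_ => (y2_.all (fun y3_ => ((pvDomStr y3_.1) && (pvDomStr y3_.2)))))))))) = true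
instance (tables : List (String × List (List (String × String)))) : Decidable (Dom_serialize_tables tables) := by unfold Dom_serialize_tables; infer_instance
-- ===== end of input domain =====

-- B replaces A's preferred-order scan + seen-set second pass by a one-pass bucket
-- (counting-sort) partition over a rank dict; same cost, different algorithm.

-- ===== PORT A =====
def preferredOrder : List String := [
  "PROGRAM CONTROL",
  "MATERIAL PROPERTIES 01 - GENERAL",
  "MATERIAL PROPERTIES 02 - BASIC MECHANICAL PROPERTIES",
  "FRAME SECTION PROPERTIES 01 - GENERAL",
  "AREA SECTION PROPERTIES",
  "JOINT COORDINATES",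
  "POINT COORDINATES",
  "CONNECTIVITY - FRAME",
  "CONNECTIVITY - LINE",
  "CONNECTIVITY - AREA",
  "FRAME SECTION ASSIGNMENTS",
  "AREA SECTION ASSIGNMENTS",
  "JOINT RESTRAINT ASSIGNMENTS",
  "LOAD PATTERN DEFINITIONS",
  "MASS SOURCE",
  "JOINT LOADS - FORCE",
  "FRAME LOADS - DISTRIBUTED",
  "AREA LOADS - UNIFORM TO FRAME",
  "AUTO SEISMIC LOADS TO JOINTS",
  "AUTO WIND LOADS TO JOINTS",
  "COMBINATION DEFINITIONS"]

-- _format_value (shared module helper of both implementations)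
def fmtValue (v : String) : String :=
  if PySem.Str.isIn " " v && !(PySem.Str.startswith v "\"" && PySem.Str.endswith v "\"") then
    "\"" ++ v ++ "\""
  else v

-- _format_row (str(v) on a str is the identity)
def fmtRow (row : List (String × String)) : String :=
  "   " ++ PySem.Str.join "   " (row.map (fun kv => kv.1 ++ "=" ++ fmtValue kv.2))

-- _write_table
def writeTable (out : List String) (name : String) (rows : List (List (String × String))) : List String :=
  (out ++ ["TABLE:  \"" ++ name ++ "\""]) ++ rows.map fmtRow ++ [""]

def serialize_tables (tables : List (String × List (List (String × String)))) : String :=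
  let out : List String := ["$ Build2AI generated/edited file", ""]
  let d := PySem.Dict.mk tables
  -- first loop: preferred tables, building the seen set
  let st := preferredOrder.foldl (fun (st : List String × PySem.Set String) name =>
      if d.contains name && !(d.getD name []).isEmpty then
        (writeTable st.1 name (d.getD name []), PySem.Set.add st.2 name)
      else st) (out, PySem.Set.empty)
  -- second loop: the remaining tables
  let out := tables.foldl (fun out p =>
      if PySem.Set.contains st.2 p.1 || p.2.isEmpty then out
      else writeTable out p.1 p.2) st.1
  PySem.Str.join "\n" (out ++ ["END TABLE DATA", ""])

-- ===== PORT B =====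
def serialize_tables_alt (tables : List (String × List (List (String × String)))) : String :=
  -- rank = {name: i for i, name in enumerate(_PREFERRED_ORDER)}
  let rank : PySem.Dict String Int :=
    (PySem.List.enumerate preferredOrder).foldl (fun d p => d.insert p.2 p.1) PySem.Dict.empty
  -- buckets = [[] for _ in range(len(_PREFERRED_ORDER) + 1)]
  let buckets : List (List (String × List (List (String × String)))) :=
    (PySem.List.pyRange 0 ((preferredOrder.length : Int) + 1) 1).map (fun _ => [])
  let buckets := tables.foldl (fun bs p =>
      if p.2.isEmpty then bs
      else
        let i := rank.getD p.1 (preferredOrder.length : Int)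
        PySem.List.pySetD bs i (PySem.List.pyGetD bs i [] ++ [p])) buckets
  let lines : List String := ["$ Build2AI generated/edited file", ""]
  let lines := buckets.foldl (fun ls bucket =>
      bucket.foldl (fun ls p =>
        (ls ++ ["TABLE:  \"" ++ p.1 ++ "\""]) ++ p.2.map fmtRow ++ [""]) ls) lines
  PySem.Str.join "\n" (lines ++ ["END TABLE DATA", ""])

-- ===== PRECONDITION & SPEC =====
-- Pre_ excludes association lists whose outer keys are not pairwise distinct: such a
-- list does not represent any Python dict (A's parameter type), so A's behaviour on it
-- is not defined by the source at all.
def Pre_serialize_tables (tables : List (String × List (List (String × String)))) : Prop :=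
  (tables.map Prod.fst).Nodup

instance (tables : List (String × List (List (String × String)))) : Decidable (Pre_serialize_tables tables) := by
  unfold Pre_serialize_tables; infer_instance

def pvWitness_serialize_tables : (List (String × List (List (String × String)))) :=
  [("JOINT COORDINATES", [[("Joint", "1"), ("X", "0 0")]]), ("MY TABLE", [[("A", "x")]]), ("PROGRAM CONTROL", [])]

def Spec_serialize_tables (tables : List (String × List (List (String × String)))) (out : String) : Prop := out = serialize_tables_alt tables
instance (tables : List (String × List (List (String × String)))) (out : String) : Decidable (Spec_serialize_tables tables out) := by unfold Spec_serialize_tables; infer_instance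

-- ===== CLAIM (what is proved, stated in full; the proofs are below) =====
def Claim_equal_serialize_tables : Prop := ∀ (tables : List (String × List (List (String × String)))), Dom_serialize_tables tables → Pre_serialize_tables tables → Spec_serialize_tables tables (serialize_tables tables)

-- ===== LEMMAS AND PROOFS =====

-- the lines a single table contributes
def tableLines (p : String × List (List (String × String))) : List String :=
  ["TABLE:  \"" ++ p.1 ++ "\""] ++ p.2.map fmtRow ++ [""]

-- the (0 or 1) entries the preferred-order scan emits for a name
def selList (d : PySem.Dict String (List (List (String × String)))) (n : String) :
    List (String × List (List (String × String))) :=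
  match d.get? n with
  | some rows => if rows.isEmpty then [] else [(n, rows)]
  | none => []

def pidx (n : String) : Nat := preferredOrder.idxOf n

theorem pref_nodup : preferredOrder.Nodup := by decide

theorem pref_length : preferredOrder.length = 21 := rfl

theorem writeTable_eq (ls : List String) (n : String) (rows : List (List (String × String))) :
    writeTable ls n rows = ls ++ tableLines (n, rows) := by
  simp [writeTable, tableLines]

theorem selList_of_true (d : PySem.Dict String (List (List (String × String)))) (n : String)
    (h : (d.contains n && !(d.getD n []).isEmpty) = true) :
    selList d n = [(n, d.getD n [])] := by
  obtain ⟨h1, h2⟩ := Bool.and_eq_true_iff.mp h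
  rw [PySem.Dict.contains_eq_isSome_get?] at h1
  cases hg : d.get? n with
  | none => rw [hg] at h1; simp at h1
  | some rows =>
    rw [PySem.Dict.getD_eq_get?_getD, hg] at h2 ⊢
    simp only [selList, hg, Option.getD_some] at *
    simp only [Bool.not_eq_true'] at h2
    simp [h2]

theorem selList_of_false (d : PySem.Dict String (List (List (String × String)))) (n : String)
    (h : (d.contains n && !(d.getD n []).isEmpty) = false) :
    selList d n = [] := by
  rw [Bool.and_eq_false_iff] at h
  cases hg : d.get? n with
  | none => simp [selList, hg]
  | some rows =>
    simp only [selList, hg]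
    rcases h with h1 | h2
    · rw [PySem.Dict.contains_eq_isSome_get?, hg] at h1; simp at h1
    · rw [PySem.Dict.getD_eq_get?_getD, hg] at h2
      simp only [Option.getD_some, Bool.not_eq_false'] at h2
      simp [h2]

-- phase 1 of A: output lines
theorem phase1_fst (d : PySem.Dict String (List (List (String × String)))) :
    ∀ (names : List String) (ls : List String) (seen : PySem.Set String),
    (names.foldl (fun (st : List String × PySem.Set String) name =>
        if d.contains name && !(d.getD name []).isEmpty then
          (writeTable st.1 name (d.getD name []), PySem.Set.add st.2 name)
        else st) (ls, seen)).1
      = ls ++ names.flatMap (fun n => (selList d n).flatMap tableLines) := by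
  intro names
  induction names with
  | nil => intro ls seen; simp
  | cons n rest ih =>
    intro ls seen
    by_cases h : (d.contains n && !(d.getD n []).isEmpty) = true
    · simp only [List.foldl_cons, h, if_pos, List.flatMap_cons]
      rw [ih, writeTable_eq, selList_of_true d n h]
      simp
    · simp only [Bool.not_eq_true] at h
      simp only [List.foldl_cons, h, Bool.false_eq_true, if_false, List.flatMap_cons]
      rw [ih, selList_of_false d n h]
      simp

-- phase 1 of A: the seen set
theorem phase1_snd (d : PySem.Dict String (List (List (String × String)))) :
    ∀ (names : List String) (ls : List String) (seen : PySem.Set String) (x : String),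
    (x ∈ (names.foldl (fun (st : List String × PySem.Set String) name =>
        if d.contains name && !(d.getD name []).isEmpty then
          (writeTable st.1 name (d.getD name []), PySem.Set.add st.2 name)
        else st) (ls, seen)).2)
      ↔ x ∈ seen ∨ (x ∈ names ∧ (d.contains x && !(d.getD x []).isEmpty) = true) := by
  intro names
  induction names with
  | nil => intro ls seen x; simp
  | cons n rest ih =>
    intro ls seen x
    by_cases h : (d.contains n && !(d.getD n []).isEmpty) = true
    · simp only [List.foldl_cons, h, if_pos]
      rw [ih]
      rw [PySem.Set.mem_add]
      constructor
      · rintro ((hs | hx) | ⟨hm, hc⟩)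
        · exact Or.inl hs
        · subst hx; exact Or.inr ⟨List.mem_cons_self, h⟩
        · exact Or.inr ⟨List.mem_cons_of_mem _ hm, hc⟩
      · rintro (hs | ⟨hm, hc⟩)
        · exact Or.inl (Or.inl hs)
        · rcases List.mem_cons.mp hm with hx | hm'
          · exact Or.inl (Or.inr hx)
          · exact Or.inr ⟨hm', hc⟩
    · simp only [Bool.not_eq_true] at h
      simp only [List.foldl_cons, h, Bool.false_eq_true, if_false]
      rw [ih]
      constructor
      · rintro (hs | ⟨hm, hc⟩)
        · exact Or.inl hs
        · exact Or.inr ⟨List.mem_cons_of_mem _ hm, hc⟩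
      · rintro (hs | ⟨hm, hc⟩)
        · exact Or.inl hs
        · rcases List.mem_cons.mp hm with hx | hm'
          · subst hx; rw [h] at hc; exact absurd hc (by simp)
          · exact Or.inr ⟨hm', hc⟩

-- phase 2 of A (generic in the skip condition)
theorem foldl_skip_append (c : (String × List (List (String × String))) → Bool) :
    ∀ (ts : List (String × List (List (String × String)))) (ls : List String),
    (ts.foldl (fun out p => if c p then out else writeTable out p.1 p.2) ls)
      = ls ++ (ts.filter (fun p => !c p)).flatMap tableLines := by
  intro ts
  induction ts with
  | nil => intro ls; simp
  | cons p rest ih =>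
    intro ls
    by_cases h : c p = true
    · simp [h, ih]
    · simp only [Bool.not_eq_true] at h
      simp only [List.foldl_cons, Bool.false_eq_true, if_false, List.filter_cons, h,
        Bool.not_false, if_pos, List.flatMap_cons]
      rw [ih, writeTable_eq]
      simp

-- B's inner emission loop
theorem foldl_emit (b : List (String × List (List (String × String)))) :
    ∀ (ls : List String),
    (b.foldl (fun ls p => (ls ++ ["TABLE:  \"" ++ p.1 ++ "\""]) ++ p.2.map fmtRow ++ [""]) ls)
      = ls ++ b.flatMap tableLines := by
  induction b with
  | nil => intro ls; simp
  | cons p rest ih =>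
    intro ls
    simp only [List.foldl_cons, List.flatMap_cons]
    rw [ih]
    simp [tableLines]

-- B's outer emission loop
theorem foldl_emit2 (bss : List (List (String × List (List (String × String))))) :
    ∀ (ls : List String),
    (bss.foldl (fun ls bucket => bucket.foldl
        (fun ls p => (ls ++ ["TABLE:  \"" ++ p.1 ++ "\""]) ++ p.2.map fmtRow ++ [""]) ls) ls)
      = ls ++ bss.flatMap (fun b => b.flatMap tableLines) := by
  induction bss with
  | nil => intro ls; simp
  | cons b rest ih =>
    intro ls
    simp only [List.foldl_cons, List.flatMap_cons]
    rw [foldl_emit, ih]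
    simp

-- the rank dictionary of B
theorem rank_items :
    ((PySem.List.enumerate preferredOrder).foldl (fun d p => d.insert p.2 p.1)
        PySem.Dict.empty).items
      = (PySem.List.enumerate preferredOrder).map (fun p => (p.2, p.1)) := by
  have := PySem.Dict.items_foldl_insert_fresh (ν := Int)
    (PySem.List.enumerate preferredOrder) (fun p => p.2) (fun p => p.1) PySem.Dict.empty
    (fun a _ => PySem.Dict.contains_empty _)
    (by rw [PySem.List.map_snd_enumerate]; exact pref_nodup)
  simpa using this

theorem rank_keys :
    ((PySem.List.enumerate preferredOrder).foldl (fun d p => d.insert p.2 p.1)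
        PySem.Dict.empty).keys = preferredOrder := by
  show ((PySem.List.enumerate preferredOrder).foldl (fun d p => d.insert p.2 p.1)
      PySem.Dict.empty).items.map (fun x => x.1) = preferredOrder
  rw [rank_items, List.map_map]
  exact PySem.List.map_snd_enumerate preferredOrder 0

theorem rank_getD (n : String) :
    ((PySem.List.enumerate preferredOrder).foldl (fun d p => d.insert p.2 p.1)
        PySem.Dict.empty).getD n (preferredOrder.length : Int) = (pidx n : Int) := by
  set rk := (PySem.List.enumerate preferredOrder).foldl (fun d p => d.insert p.2 p.1)
    PySem.Dict.empty with hrk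
  by_cases h : n ∈ preferredOrder
  · have hlt : pidx n < preferredOrder.length := List.idxOf_lt_length_iff.mpr h
    have hget : preferredOrder[pidx n] = n := List.getElem_idxOf hlt
    have hmem : (n, (pidx n : Int)) ∈ rk.items := by
      rw [rank_items]
      refine List.mem_map.mpr ⟨((pidx n : Int), n), ?_, rfl⟩
      rw [PySem.List.mem_enumerate_iff]
      exact ⟨pidx n, hlt, by rw [hget]; norm_num⟩
    have hsome : rk.get? n = some (pidx n : Int) := by
      apply PySem.Dict.get?_of_mem_items rk hmem
      rw [rank_keys]; exact pref_nodup
    rw [PySem.Dict.getD_eq_get?_getD, hsome, Option.getD_some]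
  · have hnone : rk.get? n = none := by
      rw [PySem.Dict.get?_eq_none_iff_not_mem_keys, rank_keys]; exact h
    rw [PySem.Dict.getD_eq_get?_getD, hnone, Option.getD_none]
    have : pidx n = preferredOrder.length := List.idxOf_eq_length_iff.mpr h
    rw [this]

theorem pidx_le (n : String) : pidx n ≤ 21 := by
  have := List.idxOf_le_length (l := preferredOrder) (a := n)
  rwa [pref_length] at this

-- the bucket fold of B, index-wise
theorem buckets_getD :
    ∀ (ts : List (String × List (List (String × String))))
      (bs : List (List (String × List (List (String × String))))), bs.length = 22 →
      ∀ (j : Nat), j < 22 →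
      (ts.foldl (fun bs p => if p.2.isEmpty then bs
          else bs.set (pidx p.1) (bs.getD (pidx p.1) [] ++ [p])) bs).getD j []
        = bs.getD j [] ++ ts.filter (fun p => !p.2.isEmpty && pidx p.1 == j) := by
  intro ts
  induction ts with
  | nil => intro bs _ j _; simp
  | cons p rest ih =>
    intro bs hlen j hj
    by_cases h : p.2.isEmpty = true
    · simp only [List.foldl_cons, if_pos, List.filter_cons, h, Bool.not_true,
        Bool.false_and, Bool.false_eq_true, if_false]
      exact ih bs hlen j hj
    · simp only [Bool.not_eq_true] at h
      have hi : pidx p.1 < bs.length := by rw [hlen]; exact lt_of_le_of_lt (pidx_le p.1) (by norm_num)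
      simp only [List.foldl_cons, Bool.false_eq_true, if_false, List.filter_cons, h,
        Bool.not_false, Bool.true_and]
      rw [ih _ (by rw [List.length_set]; exact hlen) j hj]
      by_cases hje : pidx p.1 = j
      · subst hje
        have : (bs.set (pidx p.1) (bs.getD (pidx p.1) [] ++ [p])).getD (pidx p.1) []
            = bs.getD (pidx p.1) [] ++ [p] := by
          rw [List.getD_eq_getElem _ _ (by rw [List.length_set]; exact hi)]
          simp
        rw [this]
        simp
      · have : (bs.set (pidx p.1) (bs.getD (pidx p.1) [] ++ [p])).getD j []
            = bs.getD j [] := by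
          rcases Nat.lt_or_ge j bs.length with hjb | hjb
          · rw [List.getD_eq_getElem _ _ (by rw [List.length_set]; exact hjb),
              List.getD_eq_getElem _ _ hjb]
            rw [List.getElem_set]
            simp [hje]
          · rw [List.getD_eq_default _ _ (by rw [List.length_set]; exact hjb),
              List.getD_eq_default _ _ hjb]
        rw [this]
        have : (pidx p.1 == j) = false := by simp [hje]
        simp [this]

theorem buckets_length :
    ∀ (ts : List (String × List (List (String × String))))
      (bs : List (List (String × List (List (String × String))))),
      (ts.foldl (fun bs p => if p.2.isEmpty then bs
          else bs.set (pidx p.1) (bs.getD (pidx p.1) [] ++ [p])) bs).length = bs.length := by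
  intro ts
  induction ts with
  | nil => intro bs; simp
  | cons p rest ih =>
    intro bs
    by_cases h : p.2.isEmpty = true
    · simp only [List.foldl_cons, h, if_pos]; exact ih bs
    · simp only [Bool.not_eq_true] at h
      simp only [List.foldl_cons, h, Bool.false_eq_true, if_false]
      rw [ih, List.length_set]

-- flatMap over a range of indices is flatMap over the list
theorem flatMap_range_getD {β : Type} (l : List String) (g : String → List β) :
    (List.range l.length).flatMap (fun j => g (l.getD j "")) = l.flatMap g := by
  induction l with
  | nil => simp
  | cons x xs ih =>
    show (List.range (xs.length + 1)).flatMap (fun j => g ((x :: xs).getD j "")) = _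
    rw [List.range_succ_eq_map, List.flatMap_cons, List.flatMap_map]
    simp only [List.getD_cons_zero, List.getD_cons_succ]
    rw [List.flatMap_cons]
    simp only [ih]

theorem flatMap_congr_mem {α β : Type} (l : List α) (f g : α → List β)
    (h : ∀ x ∈ l, f x = g x) : l.flatMap f = l.flatMap g := by
  induction l with
  | nil => rfl
  | cons x xs ih =>
    rw [List.flatMap_cons, List.flatMap_cons, h x List.mem_cons_self,
      ih (fun y hy => h y (List.mem_cons_of_mem _ hy))]

-- the per-name fiber of a nodup-keyed table list is the selList singleton
theorem filter_key :
    ∀ (ts : List (String × List (List (String × String)))),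
      (ts.map Prod.fst).Nodup → ∀ n : String,
      ts.filter (fun p => !p.2.isEmpty && p.1 == n) = selList (PySem.Dict.mk ts) n := by
  intro ts
  induction ts with
  | nil => intro _ n; simp [selList, PySem.Dict.get?]
  | cons q rest ih =>
    intro hnd n
    rw [List.map_cons] at hnd
    obtain ⟨hq, hrest⟩ := List.nodup_cons.mp hnd
    have hsel : selList (PySem.Dict.mk ((q.1, q.2) :: rest)) n
        = if q.1 == n then (if q.2.isEmpty then [] else [(q.1, q.2)])
          else selList (PySem.Dict.mk rest) n := by
      by_cases he : q.1 = n
      · subst he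
        simp only [selList, PySem.Dict.get?_mk_cons, BEq.rfl, if_pos]
      · have : (q.1 == n) = false := by simp [he]
        simp only [selList, PySem.Dict.get?_mk_cons, this, Bool.false_eq_true, if_false]
    by_cases he : q.1 = n
    · subst he
      rw [hsel]
      simp only [BEq.rfl, if_pos]
      have hrest0 : rest.filter (fun p => !p.2.isEmpty && p.1 == q.1) = [] := by
        rw [List.filter_eq_nil_iff]
        intro p hp
        have : p.1 ≠ q.1 := by
          intro hc
          exact hq (by rw [← hc]; exact List.mem_map.mpr ⟨p, hp, rfl⟩)
        simp [this]
      rw [List.filter_cons]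
      by_cases hemp : q.2.isEmpty = true
      · simp only [hemp, Bool.not_true, Bool.false_and, Bool.false_eq_true, if_false, if_pos]
        exact hrest0
      · simp only [Bool.not_eq_true] at hemp
        simp only [hemp, Bool.not_false, BEq.rfl, Bool.and_true, if_pos,
          Bool.false_eq_true, if_false]
        rw [hrest0]
    · have hne : (q.1 == n) = false := by simp [he]
      rw [hsel, hne]
      simp only [Bool.false_eq_true, if_false]
      rw [List.filter_cons]
      simp only [hne, Bool.and_false, Bool.false_eq_true, if_false]
      exact ih hrest n

-- pidx agreement with a fixed index
theorem pidx_eq_iff (n : String) (j : Nat) (hj : j < 21) :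
    (pidx n == j) = (n == preferredOrder[j]'(by rw [pref_length]; exact hj)) := by
  by_cases he : n = preferredOrder[j]'(by rw [pref_length]; exact hj)
  · subst he
    have : pidx (preferredOrder[j]'(by rw [pref_length]; exact hj)) = j :=
      List.Nodup.idxOf_getElem pref_nodup j (by rw [pref_length]; exact hj)
    simp [this]
  · have : pidx n ≠ j := by
      intro hc
      have hlt : pidx n < preferredOrder.length := by rw [pref_length]; omega
      have := List.getElem_idxOf hlt
      exact he (by subst hc; exact this.symm)
    simp [this, he]

theorem pidx_eq21_iff (n : String) : (pidx n == 21) = !decide (n ∈ preferredOrder) := by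
  by_cases h : n ∈ preferredOrder
  · have : pidx n < 21 := by
      have := List.idxOf_lt_length_iff.mpr h
      rwa [pref_length] at this
    simp [h, Nat.ne_of_lt this]
  · have : pidx n = 21 := by
      have := List.idxOf_eq_length_iff.mpr h
      rwa [pref_length] at this
    simp [h, this]

-- A's second loop keeps exactly the non-empty non-preferred tables
theorem second_filter_gen (tables : List (String × List (List (String × String))))
    (hpre : (tables.map Prod.fst).Nodup) (sn : PySem.Set String)
    (hmem : ∀ x, x ∈ sn ↔ x ∈ preferredOrder ∧
      ((PySem.Dict.mk tables).contains x && !((PySem.Dict.mk tables).getD x []).isEmpty) = true) :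
    tables.filter (fun p => !(sn.contains p.1 || p.2.isEmpty))
      = tables.filter (fun p => !p.2.isEmpty && pidx p.1 == 21) := by
  apply List.filter_congr
  intro p hp
  by_cases hemp : p.2.isEmpty = true
  · simp [hemp]
  · simp only [Bool.not_eq_true] at hemp
    have hget : (PySem.Dict.mk tables).get? p.1 = some p.2 := by
      apply PySem.Dict.get?_of_mem_items
      · show (p.1, p.2) ∈ tables
        simpa using hp
      · rw [PySem.Dict.keys_mk]
        simpa using hpre
    have hcond : ((PySem.Dict.mk tables).contains p.1 &&
        !((PySem.Dict.mk tables).getD p.1 []).isEmpty) = true := by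
      rw [PySem.Dict.contains_eq_isSome_get?, hget, PySem.Dict.getD_eq_get?_getD, hget]
      simp [hemp]
    have hmem1 : p.1 ∈ sn ↔ p.1 ∈ preferredOrder := by
      rw [hmem p.1]
      exact ⟨fun h => h.1, fun h => ⟨h, hcond⟩⟩
    have hcont : sn.contains p.1 = decide (p.1 ∈ preferredOrder) := by
      by_cases hm : p.1 ∈ preferredOrder
      · simp only [hm, decide_true]
        exact (PySem.Set.contains_iff sn p.1).mpr (hmem1.mpr hm)
      · simp only [hm, decide_false]
        rw [← Bool.not_eq_true]
        intro hc
        exact hm (hmem1.mp ((PySem.Set.contains_iff sn p.1).mp hc))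
    rw [pidx_eq21_iff, hcont]
    simp [hemp]

-- ===== VERDICT (by name: the statement is the Claim_ definition above) =====
theorem serialize_tables_spec : Claim_equal_serialize_tables := by
  intro tables _hd hpre
  unfold Spec_serialize_tables
  unfold Pre_serialize_tables at hpre
  simp only [serialize_tables, serialize_tables_alt]
  rw [phase1_fst]
  rw [foldl_skip_append]
  simp only [rank_getD, PySem.List.pySetD_natCast, PySem.List.pyGetD_natCast]
  rw [foldl_emit2]
  have hinit : (List.map (fun _ => ([] : List (String × List (List (String × String)))))
      (PySem.List.pyRange 0 ((preferredOrder.length : Int) + 1)))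
      = List.replicate 22 [] := rfl
  rw [hinit]
  have hB : (tables.foldl (fun bs p => if p.2.isEmpty = true then bs
        else bs.set (pidx p.1) (bs.getD (pidx p.1) [] ++ [p]))
        (List.replicate 22 ([] : List (String × List (List (String × String))))))
      = (List.range 22).map (fun j => tables.filter (fun p => !p.2.isEmpty && pidx p.1 == j)) := by
    apply List.ext_getElem
    · rw [buckets_length]; simp
    · intro i h1 h2
      have hi22 : i < 22 := by
        rw [buckets_length] at h1
        simpa using h1
      rw [← List.getD_eq_getElem _ [] h1]
      rw [buckets_getD tables _ (by simp) i hi22]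
      rw [List.getD_replicate _ hi22]
      simp
  rw [hB, List.flatMap_map]
  have hsplit : List.range 22 = List.range 21 ++ [21] := List.range_succ
  rw [hsplit, List.flatMap_append]
  have hpart1 : (List.range 21).flatMap
        (fun j => (tables.filter (fun p => !p.2.isEmpty && pidx p.1 == j)).flatMap tableLines)
      = preferredOrder.flatMap
        (fun n => (selList (PySem.Dict.mk tables) n).flatMap tableLines) := by
    have h21 : List.range 21 = List.range preferredOrder.length := by rw [pref_length]
    rw [h21]
    rw [flatMap_congr_mem (List.range preferredOrder.length) _
      (fun j => (selList (PySem.Dict.mk tables) (preferredOrder.getD j "")).flatMap tableLines) ?_]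
    · exact flatMap_range_getD preferredOrder (fun n => (selList (PySem.Dict.mk tables) n).flatMap tableLines)
    · intro j hj
      have hj21 : j < 21 := by
        rw [pref_length] at hj
        exact List.mem_range.mp hj
      have hjlen : j < preferredOrder.length := by rw [pref_length]; exact hj21
      congr 1
      rw [List.filter_congr (fun p _ => by rw [pidx_eq_iff p.1 j hj21])]
      rw [filter_key tables hpre]
      rw [List.getD_eq_getElem _ _ hjlen]
  have hrest := second_filter_gen tables hpre _
    (fun x => Iff.trans
      (phase1_snd (PySem.Dict.mk tables) preferredOrder
        ["$ Build2AI generated/edited file", ""] PySem.Set.empty x)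
      (by simp [PySem.Set.empty]))
  rw [hrest, hpart1]
  simp [List.append_assoc]
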